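-- pv_equiv track=rewrite | github.com/meenwolf/BachelorAssignment | allFunctions.py | getBNfromBuildingName
-- ===== SOURCE A (Python) =====
-- def getBNfromBuildingName(listofbuildings):
--     listofbuildings=[building.split()[0] for building in listofbuildings]
--     abbreviations=[]
--     if 'CITADEL' in listofbuildings:
--         abbreviations.append('CI')
--     if 'RAVELIJN' in listofbuildings:
--         abbreviations.append('RA')
--     if 'ZILVERLING' in listofbuildings:
--         abbreviations.append('ZI')
--     if 'CARRE' in listofbuildings:
--         abbreviations.extend(['CR', 'HB'])
--     if 'WAAIER' in listofbuildings:
--         abbreviations.append('WA')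
--     if 'NANOLAB' in listofbuildings:
--         abbreviations.append('NL')
--     if 'HORSTCOMPLEX' in listofbuildings or 'HORST' in listofbuildings:
--         abbreviations.extend(['NH','HN','WH','HC','OH','HZ','ME', 'HW','ZH','BH'])
--     return abbreviations
-- ===== SOURCE B (Python) =====
-- _ROW = {'CITADEL': 0, 'RAVELIJN': 1, 'ZILVERLING': 2, 'CARRE': 3,
--         'WAAIER': 4, 'NANOLAB': 5, 'HORSTCOMPLEX': 6, 'HORST': 6}
-- _CODES = [['CI'], ['RA'], ['ZI'], ['CR', 'HB'], ['WA'], ['NL'],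
--           ['NH', 'HN', 'WH', 'HC', 'OH', 'HZ', 'ME', 'HW', 'ZH', 'BH']]
--
-- def getBNfromBuildingName(listofbuildings):
--     # single pass over the INPUT: each first word is looked up once; a row index
--     # is recorded at most once, and sorted(hit) restores the fixed output order.
--     hit = set()
--     for building in listofbuildings:
--         row = _ROW.get(building.split()[0])
--         if row is not None:
--             hit.add(row)
--     return [code for row in sorted(hit) for code in _CODES[row]]
-- ===== Notes on version B (the rewrite author's own statement) =====
-- stated objective: alternative
-- what changed: Inverts the traversal direction: instead of A's eight scans of the input (one membership test per known building name, appending codes in a hard-coded if-chain), B makes one pass over the input, maps each first word through a name-to-row-index dict, accumulates the set of triggered row indices, and emits the codes of the sorted indices; correctness rests on each row firing at most once and sorted indices reproducing A's fixed order.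
import Mathlib
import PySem

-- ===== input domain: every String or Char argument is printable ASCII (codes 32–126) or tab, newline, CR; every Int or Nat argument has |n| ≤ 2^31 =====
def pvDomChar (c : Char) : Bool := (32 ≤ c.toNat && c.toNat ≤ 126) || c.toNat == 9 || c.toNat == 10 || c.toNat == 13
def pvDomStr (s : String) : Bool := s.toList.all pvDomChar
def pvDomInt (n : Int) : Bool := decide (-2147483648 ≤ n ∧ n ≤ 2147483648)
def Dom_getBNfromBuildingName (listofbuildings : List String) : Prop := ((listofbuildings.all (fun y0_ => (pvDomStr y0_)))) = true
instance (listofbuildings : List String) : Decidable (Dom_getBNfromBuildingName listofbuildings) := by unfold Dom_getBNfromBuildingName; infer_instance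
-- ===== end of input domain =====

-- B inverts A's traversal: one pass over the input mapping first words through a
-- name→row-index dict into a set of hit rows, then the sorted rows' codes (objective: alternative).

-- ===== PORT A =====
-- building.split()[0]: headD "" stands in for the [0]-indexing that Python raises
-- on for strings with no words (excluded by Pre_).
def getBNfromBuildingName (listofbuildings : List String) : List String :=
  let lob := listofbuildings.map (fun building => (PySem.Str.split₀ building).headD "")
  let abbreviations : List String := []
  let abbreviations := if "CITADEL" ∈ lob then abbreviations ++ ["CI"] else abbreviations
  let abbreviations := if "RAVELIJN" ∈ lob then abbreviations ++ ["RA"] else abbreviations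
  let abbreviations := if "ZILVERLING" ∈ lob then abbreviations ++ ["ZI"] else abbreviations
  let abbreviations := if "CARRE" ∈ lob then abbreviations ++ ["CR", "HB"] else abbreviations
  let abbreviations := if "WAAIER" ∈ lob then abbreviations ++ ["WA"] else abbreviations
  let abbreviations := if "NANOLAB" ∈ lob then abbreviations ++ ["NL"] else abbreviations
  let abbreviations := if "HORSTCOMPLEX" ∈ lob ∨ "HORST" ∈ lob then
      abbreviations ++ ["NH", "HN", "WH", "HC", "OH", "HZ", "ME", "HW", "ZH", "BH"]
    else abbreviations
  abbreviations

-- ===== PORT B =====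
def pvROW : PySem.Dict String Int :=
  PySem.Dict.mk [("CITADEL", 0), ("RAVELIJN", 1), ("ZILVERLING", 2), ("CARRE", 3),
                 ("WAAIER", 4), ("NANOLAB", 5), ("HORSTCOMPLEX", 6), ("HORST", 6)]

def pvCODES : List (List String) :=
  [["CI"], ["RA"], ["ZI"], ["CR", "HB"], ["WA"], ["NL"],
   ["NH", "HN", "WH", "HC", "OH", "HZ", "ME", "HW", "ZH", "BH"]]

def getBNfromBuildingName_alt (listofbuildings : List String) : List String :=
  let hit : PySem.Set Int :=
    listofbuildings.foldl (fun hit building =>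
      match PySem.Dict.get? pvROW ((PySem.Str.split₀ building).headD "") with
      | some row => PySem.Set.add hit row
      | none => hit) PySem.Set.empty
  -- _CODES[row]: row is a dict value, always 0..6, so the index is in range
  (PySem.List.sorted hit (fun x => x) false).flatMap
    (fun row => PySem.List.pyGetD pvCODES row [])

-- ===== PRECONDITION & SPEC =====
-- Pre_ excludes lists containing a string with no words (empty/whitespace-only), on which
-- A raises IndexError at building.split()[0] (B raises identically there).
def Pre_getBNfromBuildingName (listofbuildings : List String) : Prop :=
  ∀ b ∈ listofbuildings, PySem.Str.split₀ b ≠ []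
instance (listofbuildings : List String) : Decidable (Pre_getBNfromBuildingName listofbuildings) := by
  unfold Pre_getBNfromBuildingName; infer_instance
def pvWitness_getBNfromBuildingName : List String := ["CITADEL main", "HORST", "x y"]

def Spec_getBNfromBuildingName (listofbuildings : List String) (out : List String) : Prop := out = getBNfromBuildingName_alt listofbuildings
instance (listofbuildings : List String) (out : List String) : Decidable (Spec_getBNfromBuildingName listofbuildings out) := by unfold Spec_getBNfromBuildingName; infer_instance

-- ===== CLAIM (what is proved, stated in full; the proofs are below) =====
def Claim_equal_getBNfromBuildingName : Prop := ∀ (listofbuildings : List String), Dom_getBNfromBuildingName listofbuildings → Pre_getBNfromBuildingName listofbuildings → Spec_getBNfromBuildingName listofbuildings (getBNfromBuildingName listofbuildings)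

-- ===== LEMMAS AND PROOFS =====

-- the dict lookup, characterised
theorem pvROW_get?_iff (w : String) (r : Int) :
    PySem.Dict.get? pvROW w = some r ↔
      (w = "CITADEL" ∧ r = 0) ∨ (w = "RAVELIJN" ∧ r = 1) ∨ (w = "ZILVERLING" ∧ r = 2) ∨
      (w = "CARRE" ∧ r = 3) ∨ (w = "WAAIER" ∧ r = 4) ∨ (w = "NANOLAB" ∧ r = 5) ∨
      ((w = "HORSTCOMPLEX" ∨ w = "HORST") ∧ r = 6) := by
  simp only [pvROW, PySem.Dict.get?_mk_cons]
  split_ifs <;> simp only [beq_iff_eq] at * <;> subst_vars <;> (try simp_all) <;>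
    (first | omega | tauto)


-- per-row corollaries of the dict characterisation
theorem pvROW0 (w : String) : (PySem.Dict.get? pvROW w = some 0) ↔ w = "CITADEL" := by
  simp [pvROW_get?_iff]
theorem pvROW1 (w : String) : (PySem.Dict.get? pvROW w = some 1) ↔ w = "RAVELIJN" := by
  simp [pvROW_get?_iff]
theorem pvROW2 (w : String) : (PySem.Dict.get? pvROW w = some 2) ↔ w = "ZILVERLING" := by
  simp [pvROW_get?_iff]
theorem pvROW3 (w : String) : (PySem.Dict.get? pvROW w = some 3) ↔ w = "CARRE" := by
  simp [pvROW_get?_iff]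
theorem pvROW4 (w : String) : (PySem.Dict.get? pvROW w = some 4) ↔ w = "WAAIER" := by
  simp [pvROW_get?_iff]
theorem pvROW5 (w : String) : (PySem.Dict.get? pvROW w = some 5) ↔ w = "NANOLAB" := by
  simp [pvROW_get?_iff]
theorem pvROW6 (w : String) : (PySem.Dict.get? pvROW w = some 6) ↔ (w = "HORSTCOMPLEX" ∨ w = "HORST") := by
  simp [pvROW_get?_iff]

-- membership in the accumulated hit set
theorem pv_mem_hit (l : List String) (s : PySem.Set Int) (y : Int) :
    y ∈ l.foldl (fun hit building =>
      match PySem.Dict.get? pvROW ((PySem.Str.split₀ building).headD "") with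
      | some row => PySem.Set.add hit row
      | none => hit) s ↔
    y ∈ s ∨ ∃ b ∈ l, PySem.Dict.get? pvROW ((PySem.Str.split₀ b).headD "") = some y := by
  induction l generalizing s with
  | nil => simp
  | cons b t ih =>
    simp only [List.foldl_cons, List.mem_cons]
    cases h : PySem.Dict.get? pvROW ((PySem.Str.split₀ b).headD "") with
    | none =>
      rw [ih]
      constructor
      · rintro (hs | ⟨c, hc, hg⟩)
        · exact Or.inl hs
        · exact Or.inr ⟨c, Or.inr hc, hg⟩
      · rintro (hs | ⟨c, (rfl | hc), hg⟩)
        · exact Or.inl hs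
        · rw [h] at hg; cases hg
        · exact Or.inr ⟨c, hc, hg⟩
    | some r =>
      rw [ih]
      simp only [PySem.Set.mem_add]
      constructor
      · rintro (⟨hs | he⟩ | ⟨c, hc, hg⟩)
        · exact Or.inl hs
        · exact Or.inr ⟨b, Or.inl rfl, he ▸ h⟩
        · exact Or.inr ⟨c, Or.inr hc, hg⟩
      · rintro (hs | ⟨c, (rfl | hc), hg⟩)
        · exact Or.inl (Or.inl hs)
        · rw [h] at hg; exact Or.inl (Or.inr (Option.some.inj hg).symm)
        · exact Or.inr ⟨c, hc, hg⟩

-- the hit set stays duplicate-free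
theorem pv_nodup_hit (l : List String) (s : PySem.Set Int) (hs : s.Nodup) :
    (l.foldl (fun hit building =>
      match PySem.Dict.get? pvROW ((PySem.Str.split₀ building).headD "") with
      | some row => PySem.Set.add hit row
      | none => hit) s).Nodup := by
  induction l generalizing s with
  | nil => exact hs
  | cons b t ih =>
    simp only [List.foldl_cons]
    cases h : PySem.Dict.get? pvROW ((PySem.Str.split₀ b).headD "") with
    | none => exact ih s hs
    | some r => exact ih _ (PySem.Set.nodup_add _ _ hs)

set_option maxHeartbeats 2000000 in
theorem getBNfromBuildingName_spec : Claim_equal_getBNfromBuildingName := by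
  intro lob _ _
  show getBNfromBuildingName lob = getBNfromBuildingName_alt lob
  simp only [getBNfromBuildingName, getBNfromBuildingName_alt]
  set fw := lob.map (fun building => (PySem.Str.split₀ building).headD "") with hfw
  set hit := lob.foldl (fun hit building =>
      match PySem.Dict.get? pvROW ((PySem.Str.split₀ building).headD "") with
      | some row => PySem.Set.add hit row
      | none => hit) PySem.Set.empty with hhit
  have hmem : ∀ y, y ∈ hit ↔
      ∃ b ∈ lob, PySem.Dict.get? pvROW ((PySem.Str.split₀ b).headD "") = some y := by
    intro y; rw [hhit, pv_mem_hit]; simp [PySem.Set.empty]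
  have hsub : ∀ y ∈ hit, y ∈ ([0, 1, 2, 3, 4, 5, 6] : List Int) := by
    intro y hy
    obtain ⟨b, _, hg⟩ := (hmem y).mp hy
    rcases (pvROW_get?_iff _ _).mp hg with ⟨_, rfl⟩ | ⟨_, rfl⟩ | ⟨_, rfl⟩ | ⟨_, rfl⟩ |
      ⟨_, rfl⟩ | ⟨_, rfl⟩ | ⟨_, rfl⟩ <;> simp
  have hsorted : PySem.List.sorted hit (fun x => x) false
      = ([0, 1, 2, 3, 4, 5, 6] : List Int).filter (fun r => decide (r ∈ hit)) := by
    apply PySem.List.sorted_eq_of_perm_of_pairwise_lt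
    · apply (List.perm_ext_iff_of_nodup (List.Nodup.filter _ (by decide))
        (pv_nodup_hit lob PySem.Set.empty (by simp [PySem.Set.empty]))).mpr
      intro a
      simp only [List.mem_filter, decide_eq_true_eq]
      exact ⟨fun ⟨_, h⟩ => h, fun h => ⟨hsub a h, h⟩⟩
    · exact List.Pairwise.filter _ (by decide)
  rw [hsorted]
  have h0 : (0 : Int) ∈ hit ↔ "CITADEL" ∈ fw := by
    simp [hmem, pvROW0, hfw, List.mem_map]
  have h1 : (1 : Int) ∈ hit ↔ "RAVELIJN" ∈ fw := by
    simp [hmem, pvROW1, hfw, List.mem_map]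
  have h2 : (2 : Int) ∈ hit ↔ "ZILVERLING" ∈ fw := by
    simp [hmem, pvROW2, hfw, List.mem_map]
  have h3 : (3 : Int) ∈ hit ↔ "CARRE" ∈ fw := by
    simp [hmem, pvROW3, hfw, List.mem_map]
  have h4 : (4 : Int) ∈ hit ↔ "WAAIER" ∈ fw := by
    simp [hmem, pvROW4, hfw, List.mem_map]
  have h5 : (5 : Int) ∈ hit ↔ "NANOLAB" ∈ fw := by
    simp [hmem, pvROW5, hfw, List.mem_map]
  have h6 : (6 : Int) ∈ hit ↔ ("HORSTCOMPLEX" ∈ fw ∨ "HORST" ∈ fw) := by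
    simp [hmem, pvROW6, hfw, List.mem_map, and_or_left, exists_or]
  by_cases c0 : "CITADEL" ∈ fw <;> by_cases c1 : "RAVELIJN" ∈ fw <;>
    by_cases c2 : "ZILVERLING" ∈ fw <;> by_cases c3 : "CARRE" ∈ fw <;>
    by_cases c4 : "WAAIER" ∈ fw <;> by_cases c5 : "NANOLAB" ∈ fw <;>
    by_cases c6 : ("HORSTCOMPLEX" ∈ fw ∨ "HORST" ∈ fw) <;>
    simp [c0, c1, c2, c3, c4, c5, c6, h0, h1, h2, h3, h4, h5, h6,
      List.filter, List.flatMap, pvCODES, PySem.List.pyGetD]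

-- ===== VERDICT (by name: the statement is the Claim_ definition above) =====
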